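-- pv_equiv track=rewrite | github.com/adambujak/4TN4 | project/ml_practice/diag.py | make_image
-- ===== SOURCE A (Python) =====
-- def make_image(lines):
--     out_array = []
--     for line in lines:
--         numbers = line.split(",")
--         for number in numbers:
--             try:
--                 num = int(number)
--                 out_array += [num]
--             except ValueError:
--                 pass
--
--     return out_array
-- ===== SOURCE B (Python) =====
-- def make_image(lines):
--     out = []
--     buf = []
--
--     def flush():
--         try:
--             out.append(int(''.join(buf)))
--         except ValueError:
--             pass
--         buf.clear()
--
--     for line in lines:
--         for ch in line:
--             if ch == ',':
--                 flush()
--             else: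
--                 buf.append(ch)
--         flush()
--     return out
-- ===== Notes on version B (the rewrite author's own statement) =====
-- stated objective: alternative
-- what changed: B replaces A's split-then-parse nested loops with a character-level state machine: it never calls split, instead scanning characters one by one into a buffer that is flushed (parsed with int, errors dropped) at each comma and at each line end.
import Mathlib
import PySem

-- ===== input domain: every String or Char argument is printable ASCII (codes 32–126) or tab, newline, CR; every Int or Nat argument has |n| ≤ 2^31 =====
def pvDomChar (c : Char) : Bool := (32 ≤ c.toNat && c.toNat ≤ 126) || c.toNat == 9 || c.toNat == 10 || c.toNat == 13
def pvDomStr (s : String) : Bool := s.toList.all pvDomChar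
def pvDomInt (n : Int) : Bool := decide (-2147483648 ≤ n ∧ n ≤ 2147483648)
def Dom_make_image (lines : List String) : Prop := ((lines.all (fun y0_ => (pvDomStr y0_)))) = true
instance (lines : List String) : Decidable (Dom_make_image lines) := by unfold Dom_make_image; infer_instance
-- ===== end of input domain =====

-- B is a character-level state machine (no split): a buffer fills char by char and is
-- flushed (int-parsed, failures dropped) at each comma and line end (objective: alternative).

-- ===== PORT A =====
-- nested loop: for each line, split on "," and append each token that parses as an int.
-- line.split(",") with the nonempty literal separator is PySem.Chars.splitOn (exact);
-- int(number) / ValueError is PySem.Int.ofChars? (none = ValueError).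
def make_image (lines : List String) : List Int :=
  lines.foldl
    (fun out_array line =>
      (PySem.Chars.splitOn line.toList [',']).foldl
        (fun acc number =>
          match PySem.Int.ofChars? number with
          | some num => acc ++ [num]
          | none => acc)
        out_array)
    []

-- ===== PORT B =====
-- flush(): try int(''.join(buf)) and append, except ValueError pass; buf.clear()
def flushBuf (out : List Int) (buf : List Char) : List Int :=
  match PySem.Int.ofChars? buf with
  | some v => out ++ [v]
  | none => out

-- inner character loop: on ',' flush, otherwise append the char to the buffer
def scanChar (s : List Int × List Char) (ch : Char) : List Int × List Char :=
  if ch = ',' then (flushBuf s.1 s.2, []) else (s.1, s.2 ++ [ch])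

def make_image_alt (lines : List String) : List Int :=
  (lines.foldl
    (fun s line =>
      let s' := line.toList.foldl scanChar s
      (flushBuf s'.1 s'.2, []))
    ([], [])).1

-- ===== PRECONDITION & SPEC =====
def Spec_make_image (lines : List String) (out : List Int) : Prop := out = make_image_alt lines
instance (lines : List String) (out : List Int) : Decidable (Spec_make_image lines out) := by unfold Spec_make_image; infer_instance

-- ===== CLAIM (what is proved, stated in full; the proofs are below) =====
def Claim_equal_make_image : Prop := ∀ (lines : List String), Dom_make_image lines → Spec_make_image lines (make_image lines)

-- ===== LEMMAS AND PROOFS =====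

-- structural single-char splitter with a prefix accumulator: split1 pre s = the pieces of pre ++ s, split at ','
def split1 (pre : List Char) : List Char → List (List Char)
  | [] => [pre]
  | c :: rest => if c = ',' then pre :: split1 [] rest else split1 (pre ++ [c]) rest

-- splitOn.go with enough fuel computes split1
theorem go_eq_split1 (fuel : Nat) (l cur : List Char) (acc : List (List Char))
    (h : l.length < fuel) :
    PySem.Chars.splitOn.go [','] fuel l cur acc = acc.reverse ++ split1 cur.reverse l := by
  induction fuel generalizing l cur acc with
  | zero => omega
  | succ n ih =>
    cases l with
    | nil => rw [PySem.Chars.splitOn.go.eq_def]; simp [split1]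
    | cons c rest =>
      rw [PySem.Chars.splitOn.go.eq_def]
      simp only [List.length_cons] at h
      simp only [List.isPrefixOf, Bool.and_true,
        List.length_singleton, List.drop_succ_cons, List.drop_zero]
      by_cases hc : c = ','
      · subst hc
        rw [if_pos (by decide)]
        rw [ih rest [] (cur.reverse :: acc) (by omega)]
        simp [split1]
      · rw [if_neg (fun hp => hc ((beq_iff_eq.mp hp).symm))]
        rw [ih rest (c :: cur) acc (by omega)]
        simp [split1, hc]

theorem splitOn_eq_split1 (s : List Char) :
    PySem.Chars.splitOn s [','] = split1 [] s := by
  have := go_eq_split1 (s.length + 1) s [] [] (by omega)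
  simpa [PySem.Chars.splitOn] using this

def parseTokens (ts : List (List Char)) : List Int :=
  ts.flatMap (fun t => (PySem.Int.ofChars? t).toList)

theorem flushBuf_eq (out : List Int) (buf : List Char) :
    flushBuf out buf = out ++ (PySem.Int.ofChars? buf).toList := by
  unfold flushBuf; cases PySem.Int.ofChars? buf <;> simp

theorem fold_eq_parseTokens (ts : List (List Char)) (init : List Int) :
    ts.foldl (fun acc number =>
      match PySem.Int.ofChars? number with
      | some num => acc ++ [num]
      | none => acc) init = init ++ parseTokens ts := by
  have : (fun (acc : List Int) (number : List Char) =>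
      match PySem.Int.ofChars? number with
      | some num => acc ++ [num]
      | none => acc) = fun acc number => acc ++ (PySem.Int.ofChars? number).toList := by
    funext r t; cases PySem.Int.ofChars? t <;> simp
  rw [this, PySem.List.foldl_append_eq_flatMap]
  rfl

-- the character scan followed by a final flush parses exactly the ','-split of buf ++ cs
theorem scan_flush_eq (cs : List Char) (out : List Int) (buf : List Char) :
    flushBuf (cs.foldl scanChar (out, buf)).1 (cs.foldl scanChar (out, buf)).2
      = out ++ parseTokens (split1 buf cs) := by
  induction cs generalizing out buf with
  | nil => simp [split1, parseTokens, flushBuf_eq]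
  | cons c rest ih =>
    simp only [List.foldl_cons, scanChar]
    by_cases hc : c = ','
    · rw [if_pos hc]; subst hc
      rw [ih]
      simp [split1, parseTokens, flushBuf_eq]
    · rw [if_neg hc]
      rw [ih]
      simp [split1, hc]

-- the per-line step of B, starting with an empty buffer, appends that line's parsed tokens
theorem lines_fold_eq (xs : List String) (out : List Int) :
    (xs.foldl
      (fun s line =>
        let s' := line.toList.foldl scanChar s
        (flushBuf s'.1 s'.2, []))
      (out, [])).1
    = xs.foldl (fun o line => o ++ parseTokens (split1 [] line.toList)) out := by
  induction xs generalizing out with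
  | nil => rfl
  | cons x rest ih =>
    simp only [List.foldl_cons]
    rw [show (let s' := x.toList.foldl scanChar (out, ([] : List Char))
          (flushBuf s'.1 s'.2, ([] : List Char)))
        = (out ++ parseTokens (split1 [] x.toList), []) from by
      simp only []
      rw [Prod.ext_iff]
      exact ⟨scan_flush_eq x.toList out [], rfl⟩]
    exact ih _

-- ===== VERDICT (by name: the statement is the Claim_ definition above) =====
theorem make_image_spec : Claim_equal_make_image := by
  intro lines _
  show make_image lines = make_image_alt lines
  unfold make_image make_image_alt
  rw [lines_fold_eq]
  have key : ∀ (xs : List String) (init : List Int),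
      xs.foldl
        (fun out_array line =>
          (PySem.Chars.splitOn line.toList [',']).foldl
            (fun acc number =>
              match PySem.Int.ofChars? number with
              | some num => acc ++ [num]
              | none => acc)
            out_array)
        init
      = xs.foldl (fun o line => o ++ parseTokens (split1 [] line.toList)) init := by
    intro xs
    induction xs with
    | nil => intro init; rfl
    | cons x rest ih =>
      intro init
      simp only [List.foldl_cons]
      rw [fold_eq_parseTokens, splitOn_eq_split1, ih]
  exact key lines []
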